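-- pv_equiv track=rewrite | github.com/viralpick/ethnic-wear-trend-analysis | src/pipelines/run_local_smoke_test.py | _cluster_key
-- ===== SOURCE A (Python) =====
-- _GARMENT_HINTS: dict[str, str] = {
--     "kurtaset": "kurta_set",
--     "kurtasets": "kurta_set",
--     "kurtapalazzoset": "kurta_set",
--     "coordset": "co_ord",
--     "coordsets": "co_ord",
--     "kurtadress": "kurta_dress",
--     "anarkali": "anarkali",
--     "kurti": "tunic",
--     "tunic": "tunic",
-- }
--
-- _TECHNIQUE_HINTS: dict[str, str] = {
--     "chikankari": "chikankari",
--     "blockprint": "block_print",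
--     "handblockprint": "block_print",
--     "floralprint": "floral_print",
-- }
--
-- _FABRIC_HINTS: dict[str, str] = {
--     "cotton": "cotton",
--     "cottonkurta": "cotton",
--     "linen": "linen",
--     "rayon": "rayon",
-- }
--
-- def _normalize_tag(raw_tag: str) -> str:
--     return raw_tag.lstrip("#").lower()
--
-- def _cluster_key(hashtags: list[str]) -> str:
--     normalized = [_normalize_tag(t) for t in hashtags]
--     garment = next((_GARMENT_HINTS[t] for t in normalized if t in _GARMENT_HINTS), None)
--     technique = next((_TECHNIQUE_HINTS[t] for t in normalized if t in _TECHNIQUE_HINTS), None)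
--     fabric = next((_FABRIC_HINTS[t] for t in normalized if t in _FABRIC_HINTS), None)
--
--     if garment and technique and fabric:
--         return f"{garment}__{technique}__{fabric}"
--     if garment and technique:
--         return f"{garment}__{technique}__unknown"
--     if garment:
--         return f"{garment}__unknown__unknown"
--     return "unclassified"
-- ===== SOURCE B (Python) =====
-- _GARMENT_HINTS: dict[str, str] = {
--     "kurtaset": "kurta_set",
--     "kurtasets": "kurta_set",
--     "kurtapalazzoset": "kurta_set",
--     "coordset": "co_ord",
--     "coordsets": "co_ord",
--     "kurtadress": "kurta_dress",
--     "anarkali": "anarkali",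
--     "kurti": "tunic",
--     "tunic": "tunic",
-- }
--
-- _TECHNIQUE_HINTS: dict[str, str] = {
--     "chikankari": "chikankari",
--     "blockprint": "block_print",
--     "handblockprint": "block_print",
--     "floralprint": "floral_print",
-- }
--
-- _FABRIC_HINTS: dict[str, str] = {
--     "cotton": "cotton",
--     "cottonkurta": "cotton",
--     "linen": "linen",
--     "rayon": "rayon",
-- }
--
-- def _normalize_tag(raw_tag: str) -> str:
--     return raw_tag.lstrip("#").lower()
--
-- def _cluster_key(hashtags: list[str]) -> str:
--     # One fused pass: fill each category slot on its first match, stop early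
--     # once all three are known; no intermediate normalized list is built.
--     garment = technique = fabric = None
--     for raw in hashtags:
--         tag = _normalize_tag(raw)
--         if garment is None:
--             garment = _GARMENT_HINTS.get(tag)
--         if technique is None:
--             technique = _TECHNIQUE_HINTS.get(tag)
--         if fabric is None:
--             fabric = _FABRIC_HINTS.get(tag)
--         if garment is not None and technique is not None and fabric is not None:
--             break
--     if garment is None:
--         return "unclassified"
--     if technique is None:
--         return f"{garment}__unknown__unknown"
--     if fabric is None:
--         return f"{garment}__{technique}__unknown"
--     return f"{garment}__{technique}__{fabric}"
-- ===== Notes on version B (the rewrite author's own statement) =====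
-- stated objective: alternative
-- what changed: B replaces A's normalized-list build plus three separate first-match generator scans with a single fused pass over the raw hashtags that fills the three category slots on their first match and exits early once all three are set, then assembles the key via guard-style early returns.
import Mathlib
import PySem

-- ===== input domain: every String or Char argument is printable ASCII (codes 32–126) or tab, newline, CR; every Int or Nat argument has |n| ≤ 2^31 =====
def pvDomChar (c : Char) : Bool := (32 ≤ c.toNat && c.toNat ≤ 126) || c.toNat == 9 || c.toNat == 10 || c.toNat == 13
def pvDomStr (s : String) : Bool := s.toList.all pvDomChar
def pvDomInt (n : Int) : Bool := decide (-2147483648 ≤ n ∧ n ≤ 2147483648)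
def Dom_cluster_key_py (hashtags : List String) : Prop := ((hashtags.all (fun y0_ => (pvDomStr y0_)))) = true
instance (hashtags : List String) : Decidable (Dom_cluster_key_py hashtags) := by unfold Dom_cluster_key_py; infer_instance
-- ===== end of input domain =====

-- B fuses A's three separate first-match scans into one early-exiting pass (objective: alternative decomposition).

-- ===== PORT A =====
-- module-level hint dicts (shared by both versions, like the Python module constants)
def garmentHints : PySem.Dict String String := PySem.Dict.mk
  [("kurtaset", "kurta_set"), ("kurtasets", "kurta_set"), ("kurtapalazzoset", "kurta_set"),
   ("coordset", "co_ord"), ("coordsets", "co_ord"), ("kurtadress", "kurta_dress"),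
   ("anarkali", "anarkali"), ("kurti", "tunic"), ("tunic", "tunic")]

def techniqueHints : PySem.Dict String String := PySem.Dict.mk
  [("chikankari", "chikankari"), ("blockprint", "block_print"),
   ("handblockprint", "block_print"), ("floralprint", "floral_print")]

def fabricHints : PySem.Dict String String := PySem.Dict.mk
  [("cotton", "cotton"), ("cottonkurta", "cotton"), ("linen", "linen"), ("rayon", "rayon")]

-- raw_tag.lstrip("#").lower(); lstrip("#") drops exactly the leading '#' characters (exact, ported by hand)
def normalizeTag (raw : String) : String :=
  PySem.Str.lower (String.ofList (raw.toList.dropWhile (· == '#')))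

-- next((d[t] for t in ts if t in d), None): first t present in d, its value
def firstHint (d : PySem.Dict String String) : List String → Option String
  | [] => none
  | t :: rest => if d.contains t then d.get? t else firstHint d rest

-- the hint values are nonempty strings, so Python truthiness on them is isSome
def cluster_key_py (hashtags : List String) : String :=
  let normalized := hashtags.map normalizeTag
  let garment := firstHint garmentHints normalized
  let technique := firstHint techniqueHints normalized
  let fabric := firstHint fabricHints normalized
  match garment, technique, fabric with
  | some g, some t, some f => g ++ "__" ++ t ++ "__" ++ f
  | some g, some t, none => g ++ "__" ++ t ++ "__unknown"
  | some g, none, _ => g ++ "__unknown__unknown"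
  | none, _, _ => "unclassified"

-- ===== PORT B =====
-- the fused loop of Source B: fill each slot on its first match, break once all three are set
def fusedScan : List String → Option String → Option String → Option String →
    Option String × Option String × Option String
  | [], g, t, f => (g, t, f)
  | raw :: rest, g, t, f =>
    let tag := normalizeTag raw
    let g' := if g.isNone then garmentHints.get? tag else g
    let t' := if t.isNone then techniqueHints.get? tag else t
    let f' := if f.isNone then fabricHints.get? tag else f
    if g'.isSome && t'.isSome && f'.isSome then (g', t', f')
    else fusedScan rest g' t' f'

def cluster_key_py_alt (hashtags : List String) : String :=
  match fusedScan hashtags none none none with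
  | (none, _, _) => "unclassified"
  | (some g, none, _) => g ++ "__unknown__unknown"
  | (some g, some t, none) => g ++ "__" ++ t ++ "__unknown"
  | (some g, some t, some f) => g ++ "__" ++ t ++ "__" ++ f

-- ===== PRECONDITION & SPEC =====
def Spec_cluster_key_py (hashtags : List String) (out : String) : Prop := out = cluster_key_py_alt hashtags
instance (hashtags : List String) (out : String) : Decidable (Spec_cluster_key_py hashtags out) := by unfold Spec_cluster_key_py; infer_instance

-- ===== CLAIM (what is proved, stated in full; the proofs are below) =====
def Claim_equal_cluster_key_py : Prop := ∀ (hashtags : List String), Dom_cluster_key_py hashtags → Spec_cluster_key_py hashtags (cluster_key_py hashtags)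

-- ===== LEMMAS AND PROOFS =====

-- one fused step agrees with prepending the tag to a first-match scan
theorem step_firstHint (d : PySem.Dict String String) (o : Option String) (tag : String)
    (ns : List String) :
    ((if o.isNone then d.get? tag else o).rec (firstHint d ns) some :
      Option String) =
    (o.rec (firstHint d (tag :: ns)) some : Option String) := by
  cases o with
  | some v => rfl
  | none =>
    simp only [firstHint, PySem.Dict.contains_eq_isSome_get?, Option.isNone_none, if_true]
    cases d.get? tag <;> simp

-- orElse written as Option.rec, to state the invariant
def orE (o : Option String) (p : Option String) : Option String :=
  (o.rec p some : Option String)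

theorem fusedScan_eq (ts : List String) : ∀ (g t f : Option String),
    fusedScan ts g t f =
      (orE g (firstHint garmentHints (ts.map normalizeTag)),
       orE t (firstHint techniqueHints (ts.map normalizeTag)),
       orE f (firstHint fabricHints (ts.map normalizeTag))) := by
  induction ts with
  | nil => intro g t f; cases g <;> cases t <;> cases f <;> rfl
  | cons raw rest ih =>
    intro g t f
    simp only [fusedScan]
    have keyG : orE (if g.isNone then garmentHints.get? (normalizeTag raw) else g)
        (firstHint garmentHints (rest.map normalizeTag)) =
        orE g (firstHint garmentHints ((raw :: rest).map normalizeTag)) := by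
      simpa only [orE, List.map_cons] using
        step_firstHint garmentHints g (normalizeTag raw) (rest.map normalizeTag)
    have keyT : orE (if t.isNone then techniqueHints.get? (normalizeTag raw) else t)
        (firstHint techniqueHints (rest.map normalizeTag)) =
        orE t (firstHint techniqueHints ((raw :: rest).map normalizeTag)) := by
      simpa only [orE, List.map_cons] using
        step_firstHint techniqueHints t (normalizeTag raw) (rest.map normalizeTag)
    have keyF : orE (if f.isNone then fabricHints.get? (normalizeTag raw) else f)
        (firstHint fabricHints (rest.map normalizeTag)) =
        orE f (firstHint fabricHints ((raw :: rest).map normalizeTag)) := by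
      simpa only [orE, List.map_cons] using
        step_firstHint fabricHints f (normalizeTag raw) (rest.map normalizeTag)
    by_cases hall : ((if g.isNone then garmentHints.get? (normalizeTag raw) else g).isSome
        && (if t.isNone then techniqueHints.get? (normalizeTag raw) else t).isSome
        && (if f.isNone then fabricHints.get? (normalizeTag raw) else f).isSome) = true
    · rw [if_pos hall]
      obtain ⟨⟨hg, ht⟩, hf⟩ := by simpa only [Bool.and_eq_true] using hall
      obtain ⟨vg, hvg⟩ := Option.isSome_iff_exists.mp hg
      obtain ⟨vt, hvt⟩ := Option.isSome_iff_exists.mp ht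
      obtain ⟨vf, hvf⟩ := Option.isSome_iff_exists.mp hf
      rw [← keyG, ← keyT, ← keyF, hvg, hvt, hvf]; rfl
    · rw [if_neg hall, ih, keyG, keyT, keyF]

-- ===== VERDICT (by name: the statement is the Claim_ definition above) =====
theorem cluster_key_py_spec : Claim_equal_cluster_key_py := by
  intro hashtags _
  show cluster_key_py hashtags = cluster_key_py_alt hashtags
  simp only [cluster_key_py, cluster_key_py_alt, fusedScan_eq, orE]
  cases firstHint garmentHints (hashtags.map normalizeTag) <;>
    cases firstHint techniqueHints (hashtags.map normalizeTag) <;>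
      cases firstHint fabricHints (hashtags.map normalizeTag) <;> rfl
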